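-- pv_equiv track=rewrite | github.com/peterestelaweb/lifeplusproductoswindsurf- | lifeplus_visual_catalog.py | generate_product_benefits
-- ===== SOURCE A (Python) =====
-- def generate_product_benefits(product_name):
--     """Generate relevant benefits based on product name"""
--     benefits = []
--     name_lower = product_name.lower()
--
--     if any(word in name_lower for word in ['daily biobasics', 'vitamin', 'mineral']):
--         benefits = ['Energía diaria', 'Sistema inmunológico', 'Bienestar general']
--     elif 'protein' in name_lower:
--         benefits = ['Recuperación muscular', 'Masa muscular', 'Saciedad']
--     elif 'antioxidant' in name_lower or 'proanthenols' in name_lower: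
--         benefits = ['Protección celular', 'Anti-envejecimiento', 'Salud cardiovascular']
--     elif 'omega' in name_lower or 'omegold' in name_lower:
--         benefits = ['Salud cerebral', 'Función cardiovascular', 'Antiinflamatorio']
--     elif 'solis' in name_lower:
--         benefits = ['Energía natural', 'Nutrientes concentrados', 'Salud holística']
--     elif 'forever young' in name_lower:
--         benefits = ['Cuidado facial', 'Antienvejecimiento', 'Hidratación']
--     else:
--         benefits = ['Calidad premium', 'Resultados comprobados', 'Bienestar integral']
--
--     return benefits
-- ===== SOURCE B (Python) =====
-- KEYWORD_CATEGORY = {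
--     'daily biobasics': 0, 'vitamin': 0, 'mineral': 0,
--     'protein': 1,
--     'antioxidant': 2, 'proanthenols': 2,
--     'omega': 3, 'omegold': 3,
--     'solis': 4,
--     'forever young': 5,
-- }
--
-- BENEFITS = [
--     ['Energía diaria', 'Sistema inmunológico', 'Bienestar general'],
--     ['Recuperación muscular', 'Masa muscular', 'Saciedad'],
--     ['Protección celular', 'Anti-envejecimiento', 'Salud cardiovascular'],
--     ['Salud cerebral', 'Función cardiovascular', 'Antiinflamatorio'],
--     ['Energía natural', 'Nutrientes concentrados', 'Salud holística'],
--     ['Cuidado facial', 'Antienvejecimiento', 'Hidratación'],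
--     ['Calidad premium', 'Resultados comprobados', 'Bienestar integral'],
-- ]
--
--
-- def generate_product_benefits(product_name):
--     """Generate relevant benefits based on product name"""
--     name_lower = product_name.lower()
--     cat = min((c for kw, c in KEYWORD_CATEGORY.items() if kw in name_lower),
--               default=len(BENEFITS) - 1)
--     return BENEFITS[cat]
-- ===== Notes on version B (the rewrite author's own statement) =====
-- stated objective: alternative
-- what changed: B replaces the ordered if/elif priority chain by a flat keyword-to-category map scanned once, taking the MINIMUM matching category number (default = last) and indexing a benefits table, so priority is recovered arithmetically via min instead of by test order.
import Mathlib
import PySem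

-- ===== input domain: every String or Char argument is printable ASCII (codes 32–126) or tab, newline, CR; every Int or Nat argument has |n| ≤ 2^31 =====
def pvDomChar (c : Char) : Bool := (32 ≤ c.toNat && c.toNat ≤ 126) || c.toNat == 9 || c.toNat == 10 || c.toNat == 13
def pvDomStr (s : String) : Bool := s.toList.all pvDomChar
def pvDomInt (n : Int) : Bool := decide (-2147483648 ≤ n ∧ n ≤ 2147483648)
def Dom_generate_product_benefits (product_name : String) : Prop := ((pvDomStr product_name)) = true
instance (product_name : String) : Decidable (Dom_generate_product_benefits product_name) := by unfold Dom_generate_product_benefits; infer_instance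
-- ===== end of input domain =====

-- B replaces A's if/elif priority chain by a flat keyword→category map folded with min, then a table lookup (objective: alternative).


-- ===== PORT A =====
def generate_product_benefits (product_name : String) : List String :=
  let name_lower := PySem.Str.lower product_name
  if (["daily biobasics", "vitamin", "mineral"] : List String).any
      (fun word => PySem.Str.isIn word name_lower) then
    ["Energía diaria", "Sistema inmunológico", "Bienestar general"]
  else if PySem.Str.isIn "protein" name_lower then
    ["Recuperación muscular", "Masa muscular", "Saciedad"]
  else if PySem.Str.isIn "antioxidant" name_lower || PySem.Str.isIn "proanthenols" name_lower then
    ["Protección celular", "Anti-envejecimiento", "Salud cardiovascular"]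
  else if PySem.Str.isIn "omega" name_lower || PySem.Str.isIn "omegold" name_lower then
    ["Salud cerebral", "Función cardiovascular", "Antiinflamatorio"]
  else if PySem.Str.isIn "solis" name_lower then
    ["Energía natural", "Nutrientes concentrados", "Salud holística"]
  else if PySem.Str.isIn "forever young" name_lower then
    ["Cuidado facial", "Antienvejecimiento", "Hidratación"]
  else
    ["Calidad premium", "Resultados comprobados", "Bienestar integral"]

-- ===== PORT B =====
def pvKEYWORD_CATEGORY : List (String × Nat) :=
  [ ("daily biobasics", 0), ("vitamin", 0), ("mineral", 0),
    ("protein", 1),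
    ("antioxidant", 2), ("proanthenols", 2),
    ("omega", 3), ("omegold", 3),
    ("solis", 4),
    ("forever young", 5) ]

def pvBENEFITS : List (List String) :=
  [ ["Energía diaria", "Sistema inmunológico", "Bienestar general"],
    ["Recuperación muscular", "Masa muscular", "Saciedad"],
    ["Protección celular", "Anti-envejecimiento", "Salud cardiovascular"],
    ["Salud cerebral", "Función cardiovascular", "Antiinflamatorio"],
    ["Energía natural", "Nutrientes concentrados", "Salud holística"],
    ["Cuidado facial", "Antienvejecimiento", "Hidratación"],
    ["Calidad premium", "Resultados comprobados", "Bienestar integral"] ]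

def generate_product_benefits_alt (product_name : String) : List String :=
  let name_lower := PySem.Str.lower product_name
  -- min over the categories of the matching keywords, default = last index (6)
  let cat := pvKEYWORD_CATEGORY.foldl
    (fun acc kc => if PySem.Str.isIn kc.1 name_lower then min acc kc.2 else acc)
    (pvBENEFITS.length - 1)
  -- BENEFITS[cat]: cat is always in range (0..6)
  pvBENEFITS.getD cat []

-- ===== PRECONDITION & SPEC =====
def Spec_generate_product_benefits (product_name : String) (out : List String) : Prop := out = generate_product_benefits_alt product_name
instance (product_name : String) (out : List String) : Decidable (Spec_generate_product_benefits product_name out) := by unfold Spec_generate_product_benefits; infer_instance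

-- ===== CLAIM (what is proved, stated in full; the proofs are below) =====
def Claim_equal_generate_product_benefits : Prop := ∀ (product_name : String), Dom_generate_product_benefits product_name → Spec_generate_product_benefits product_name (generate_product_benefits product_name)

-- ===== LEMMAS AND PROOFS =====

-- ===== VERDICT (by name: the statement is the Claim_ definition above) =====
-- abstract first-match-chain = min-fold lemma, over the ten match booleans
theorem pvKey (b1 b2 b3 b4 b5 b6 b7 b8 b9 b10 : Bool) :
    (if b1 || (b2 || b3) then ["Energía diaria", "Sistema inmunológico", "Bienestar general"]
     else if b4 then ["Recuperación muscular", "Masa muscular", "Saciedad"]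
     else if b5 || b6 then ["Protección celular", "Anti-envejecimiento", "Salud cardiovascular"]
     else if b7 || b8 then ["Salud cerebral", "Función cardiovascular", "Antiinflamatorio"]
     else if b9 then ["Energía natural", "Nutrientes concentrados", "Salud holística"]
     else if b10 then ["Cuidado facial", "Antienvejecimiento", "Hidratación"]
     else ["Calidad premium", "Resultados comprobados", "Bienestar integral"])
    = pvBENEFITS.getD
        (List.foldl (fun acc (kc : Bool × Nat) => if kc.1 then min acc kc.2 else acc)
          (pvBENEFITS.length - 1)
          [(b1, 0), (b2, 0), (b3, 0), (b4, 1), (b5, 2), (b6, 2), (b7, 3), (b8, 3), (b9, 4), (b10, 5)]) [] := by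
  cases b1 <;> cases b2 <;> cases b3 <;> cases b4 <;> cases b5 <;> cases b6 <;> cases b7 <;> cases b8 <;> cases b9 <;> cases b10 <;> rfl

theorem generate_product_benefits_spec : Claim_equal_generate_product_benefits := by
  intro s _
  unfold Spec_generate_product_benefits
  show generate_product_benefits s = generate_product_benefits_alt s
  have hmap : ∀ nl : String,
      pvKEYWORD_CATEGORY.foldl
        (fun acc kc => if PySem.Str.isIn kc.1 nl then min acc kc.2 else acc)
        (pvBENEFITS.length - 1)
      = List.foldl (fun acc (kc : Bool × Nat) => if kc.1 then min acc kc.2 else acc)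
          (pvBENEFITS.length - 1) [(PySem.Str.isIn "daily biobasics" nl, 0), (PySem.Str.isIn "vitamin" nl, 0), (PySem.Str.isIn "mineral" nl, 0), (PySem.Str.isIn "protein" nl, 1), (PySem.Str.isIn "antioxidant" nl, 2), (PySem.Str.isIn "proanthenols" nl, 2), (PySem.Str.isIn "omega" nl, 3), (PySem.Str.isIn "omegold" nl, 3), (PySem.Str.isIn "solis" nl, 4), (PySem.Str.isIn "forever young" nl, 5)] := fun nl => rfl
  simp only [generate_product_benefits, generate_product_benefits_alt,
    List.any_cons, List.any_nil, Bool.or_false, hmap]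
  exact pvKey _ _ _ _ _ _ _ _ _ _
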